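-- pv_equiv track=rewrite | github.com/pypi-data/pypi-mirror-49 | packages/us-netview-non-major/us_netview_non_major-0.9-py3-none-any.whl/us_netview/Lace.py | rankRowTargets
-- ===== SOURCE A (Python) =====
-- import collections
--
-- def rankRowTargets( rowTargets ):
--    rankedRowTargets = [0] * len(rowTargets)
--    d = dict()
--    for row in range(len(rowTargets)):
--       if rowTargets[row] in d:
--          d[rowTargets[row]] = d.get(rowTargets[row], 0) + [row]
--       else:
--          d[rowTargets[row]] = [row]
--
--    # Sort the dictionary by key in reverse order
--    od = collections.OrderedDict(sorted(d.items(), reverse=True))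
--
--    r_index = 0
--    for value in od.values():
--       for num in sorted(value, reverse=True):
--          rankedRowTargets[r_index] = num
--          r_index = r_index + 1
--
--    return rankedRowTargets
-- ===== SOURCE B (Python) =====
-- def rankRowTargets(rowTargets):
--     # One keyed sort replaces the group-by-value dict and per-group sorts:
--     # reverse sort by (target value, index) gives target-descending order with
--     # index-descending tie-breaking, exactly A's ranking.
--     return sorted(range(len(rowTargets)), key=lambda r: (rowTargets[r], r), reverse=True)
-- ===== Notes on version B (the rewrite author's own statement) =====
-- stated objective: simpler
-- what changed: Replaced A's build-a-value->indices-dict, sort-the-keys, sort-each-group-and-concatenate scheme by a single reverse sort of all row indices keyed by the pair (target value, index).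
import Mathlib
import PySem

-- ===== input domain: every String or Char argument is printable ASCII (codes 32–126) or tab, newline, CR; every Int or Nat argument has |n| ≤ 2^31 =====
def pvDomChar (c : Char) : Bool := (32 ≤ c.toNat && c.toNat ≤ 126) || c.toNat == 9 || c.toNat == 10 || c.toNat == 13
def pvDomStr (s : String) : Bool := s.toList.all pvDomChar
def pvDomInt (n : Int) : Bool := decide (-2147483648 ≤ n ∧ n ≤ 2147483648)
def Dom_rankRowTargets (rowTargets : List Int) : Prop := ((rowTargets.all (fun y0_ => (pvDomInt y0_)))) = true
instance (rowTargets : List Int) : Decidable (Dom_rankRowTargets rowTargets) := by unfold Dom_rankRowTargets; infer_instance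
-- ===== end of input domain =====

-- B replaces A's group-by-value dict + per-group sorts + concatenation by one reverse
-- sort of all row indices keyed by (target value, index): simpler, same O(n log n) cost.

-- ===== PORT A =====
-- A-side helper: A's first loop (build the value -> list-of-rows dict).
-- Python's `d.get(rowTargets[row], 0)` is only evaluated when the key is present,
-- so the typed default [] here is never used.
def rankDict (rowTargets : List Int) : PySem.Dict Int (List Int) :=
  (PySem.List.pyRange 0 rowTargets.length 1).foldl
    (fun d row =>
      let v := PySem.List.pyGetD rowTargets row 0
      if d.contains v then d.insert v (d.getD v [] ++ [row])
      else d.insert v [row])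
    PySem.Dict.empty

-- A-side helper: the body of A's output loop for one dict entry
-- (`for num in sorted(value, reverse=True): rankedRowTargets[r_index] = num; r_index += 1`).
-- `rankedRowTargets[r_index] = num` is pySetD: the index is provably in range
-- (exactly length-many writes happen), so Python never raises here.
def rankFill (st : List Int × Int) (kv : Int × List Int) : List Int × Int :=
  (PySem.List.sorted kv.2 (fun x => x) true).foldl
    (fun st num => (PySem.List.pySetD st.1 st.2 num, st.2 + 1)) st

def rankRowTargets (rowTargets : List Int) : List Int :=
  let rankedRowTargets : List Int := List.replicate rowTargets.length 0
  -- sorted(d.items(), reverse=True): the keys are distinct, so Python's tuple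
  -- comparison is decided by the key alone (the list component is never compared)
  let od := PySem.List.sorted (rankDict rowTargets).items (fun p => p.1) true
  (od.foldl rankFill (rankedRowTargets, 0)).1

-- ===== PORT B =====
-- Source B: sorted(range(len(rowTargets)), key=lambda r: (rowTargets[r], r), reverse=True).
-- Lex (Int × Int) is exactly Python's tuple comparison; rowTargets[r] with r drawn from
-- range(len(rowTargets)) never raises, so pyGetD's default is never used.
def rankRowTargets_alt (rowTargets : List Int) : List Int :=
  PySem.List.sorted (PySem.List.pyRange 0 rowTargets.length 1)
    (fun r => toLex (PySem.List.pyGetD rowTargets r 0, r)) true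

-- ===== PRECONDITION & SPEC =====
def Spec_rankRowTargets (rowTargets : List Int) (out : List Int) : Prop := out = rankRowTargets_alt rowTargets
instance (rowTargets : List Int) (out : List Int) : Decidable (Spec_rankRowTargets rowTargets out) := by unfold Spec_rankRowTargets; infer_instance

-- ===== CLAIM (what is proved, stated in full; the proofs are below) =====
def Claim_equal_rankRowTargets : Prop := ∀ (rowTargets : List Int), Dom_rankRowTargets rowTargets → Spec_rankRowTargets rowTargets (rankRowTargets rowTargets)

-- ===== LEMMAS AND PROOFS =====

-- proof-side names for the intermediate values of A's pipeline
def pvPairs (t : List Int) : List (Int × Int) :=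
  (PySem.List.pyRange 0 t.length 1).map (fun r => (PySem.List.pyGetD t r 0, r))

def pvOd (t : List Int) : List (Int × List Int) :=
  PySem.List.sorted (rankDict t).items (fun p => p.1) true

def pvGroups (t : List Int) : List (List Int) :=
  (pvOd t).map (fun kv => PySem.List.sorted kv.2 (fun x => x) true)

-- A's inner write loop: writing the elements of ws sequentially at positions
-- |A|, |A|+1, … into A ++ B overwrites the front of B.
lemma pv_fill_one (ws : List Int) (A B : List Int) (h : ws.length ≤ B.length) :
    ws.foldl (fun st num => (PySem.List.pySetD st.1 st.2 num, st.2 + 1)) (A ++ B, (A.length : Int))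
      = (A ++ ws ++ B.drop ws.length, ((A.length : Int) + ws.length)) := by
  induction ws generalizing A B with
  | nil => simp
  | cons w ws ih =>
    cases B with
    | nil => simp at h
    | cons b B =>
      simp only [List.foldl_cons]
      have hset : PySem.List.pySetD (A ++ b :: B) (A.length : Int) w = A ++ w :: B := by
        rw [PySem.List.pySetD_natCast]
        rw [List.set_eq_take_append_cons_drop]
        simp
      have hidx : (A.length : Int) + 1 = ((A ++ [w]).length : Int) := by simp
      rw [hset, hidx]
      have hAB : A ++ w :: B = (A ++ [w]) ++ B := by simp
      rw [hAB, ih (A ++ [w]) B (by simp at h; omega)]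
      simp
      omega

-- A's outer loop over the dict groups, phrased the same way.
lemma pv_fill_groups (gs : List (List Int)) (A B : List Int) (h : gs.flatten.length ≤ B.length) :
    gs.foldl (fun st g => g.foldl (fun st num => (PySem.List.pySetD st.1 st.2 num, st.2 + 1)) st) (A ++ B, (A.length : Int))
      = (A ++ gs.flatten ++ B.drop gs.flatten.length, ((A.length : Int) + gs.flatten.length)) := by
  induction gs generalizing A B with
  | nil => simp
  | cons g gs ih =>
    simp only [List.foldl_cons, List.flatten_cons]
    have h1 : g.length ≤ B.length := by simp [List.length_append] at h; omega
    rw [pv_fill_one g A B h1]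
    have hAB2 : A ++ g ++ B.drop g.length = (A ++ g) ++ B.drop g.length := by simp
    have hidx : (A.length : Int) + g.length = ((A ++ g).length : Int) := by simp
    rw [hAB2, hidx, ih (A ++ g) (B.drop g.length) (by simp [List.length_append] at h ⊢; omega)]
    simp only [Prod.mk.injEq]
    refine ⟨?_, ?_⟩
    · rw [List.drop_drop]
      simp [List.append_assoc, List.length_append]
    · simp [List.length_append]
      omega

-- Concatenating, over a duplicate-free covering key list, the second components of
-- the pairs whose first component is that key, permutes the second components.
lemma pv_partition_perm (ks : List Int) (ps : List (Int × Int)) (hnd : ks.Nodup)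
    (hcov : ∀ p ∈ ps, p.1 ∈ ks) :
    (ks.map (fun c => (ps.filter (fun p => p.1 == c)).map (fun p => p.2))).flatten.Perm
      (ps.map (fun p => p.2)) := by
  induction ks generalizing ps with
  | nil =>
    cases ps with
    | nil => simp
    | cons p ps => exact absurd (hcov p (by simp)) (by simp)
  | cons c ks ih =>
    simp only [List.map_cons, List.flatten_cons]
    have hck : c ∉ ks := (List.nodup_cons.mp hnd).1
    have hrest : ∀ c' ∈ ks, ps.filter (fun p => p.1 == c')
        = (ps.filter (fun p => !(p.1 == c))).filter (fun p => p.1 == c') := by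
      intro c' hc'
      rw [List.filter_filter]
      apply List.filter_congr
      intro p _
      by_cases hpc : p.1 = c'
      · have hne : c' ≠ c := fun hcc => hck (hcc ▸ hc')
        simp [hpc, hne]
      · simp [hpc]
    have hmaps : ks.map (fun c' => (ps.filter (fun p => p.1 == c')).map (fun p => p.2))
        = ks.map (fun c' => ((ps.filter (fun p => !(p.1 == c))).filter (fun p => p.1 == c')).map (fun p => p.2)) :=
      List.map_congr_left (fun c' hc' => by rw [hrest c' hc'])
    rw [hmaps]
    have ihr := ih (ps.filter (fun p => !(p.1 == c))) hnd.of_cons (by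
      intro p hp
      have hmem := List.mem_of_mem_filter hp
      have hne : ¬ (p.1 == c) = true := by
        have := List.of_mem_filter hp; simpa using this
      have hck2 := hcov p hmem
      simp at hck2 ⊢
      rcases hck2 with h' | h'
      · exact absurd (by simp [h']) hne
      · exact h')
    refine (List.Perm.append_left _ ihr).trans ?_
    rw [← List.map_append]
    exact List.Perm.map _ (List.filter_append_perm _ ps)

-- flatten of pointwise-permuted groups
lemma pv_flatten_map_perm {α β : Type} (l : List α) (f g : α → List β)
    (h : ∀ x ∈ l, (f x).Perm (g x)) : (l.map f).flatten.Perm ((l.map g).flatten) := by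
  induction l with
  | nil => simp
  | cons a l ih =>
    simp only [List.map_cons, List.flatten_cons]
    exact (h a (by simp)).append (ih (fun x hx => h x (by simp [hx])))

-- A's grouping loop is the canonical modify-fold over the (value, index) pairs
lemma pv_dict_eq (t : List Int) :
    rankDict t = (pvPairs t).foldl (fun d p => d.modify p.1 [] (fun x => x ++ [p.2])) PySem.Dict.empty := by
  rw [rankDict, pvPairs, List.foldl_map]
  apply PySem.List.foldl_congr_mem
  intro d row _
  show (let v := PySem.List.pyGetD t row 0;
        if d.contains v then d.insert v (d.getD v [] ++ [row]) else d.insert v [row]) = _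
  by_cases hc : d.contains (PySem.List.pyGetD t row 0) = true
  · simp only [hc, if_true, PySem.Dict.modify]
  · have h0 := PySem.Dict.getD_of_not_contains d ([] : List Int) (by simpa using hc)
    simp only [PySem.Dict.modify, hc, h0]
    simp

lemma pv_keys (t : List Int) :
    (rankDict t).keys = PySem.Set.ofList ((pvPairs t).map (fun p => p.1)) := by
  rw [pv_dict_eq]
  rw [PySem.Dict.keys_foldl_modify_key (pvPairs t) (fun p => p.1) ([] : List Int)
      (fun _ p => (fun x => x ++ [p.2])) PySem.Dict.empty]
  rw [PySem.Dict.keys_empty, PySem.Set.ofList_eq_foldl]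
  rfl

lemma pv_nodup_keys (t : List Int) : (rankDict t).keys.Nodup := by
  rw [pv_keys]; exact PySem.Set.nodup_ofList _

lemma pv_getD (t : List Int) (c : Int) :
    (rankDict t).getD c [] = ((pvPairs t).filter (fun p => p.1 == c)).map (fun p => p.2) := by
  rw [pv_dict_eq]
  simpa using PySem.Dict.getD_foldl_modify_append (pvPairs t) PySem.Dict.empty c

lemma pv_items (t : List Int) :
    (rankDict t).items = (rankDict t).keys.map (fun k => (k, (rankDict t).getD k [])) :=
  PySem.Dict.items_eq_map_keys _ (pv_nodup_keys t) []

lemma pv_map_snd (t : List Int) :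
    (pvPairs t).map (fun p => p.2) = PySem.List.pyRange 0 t.length 1 := by
  rw [pvPairs, List.map_map]
  have hco : ((fun p : Int × Int => p.2) ∘ fun r : Int => (PySem.List.pyGetD t r 0, r)) = id := rfl
  rw [hco, List.map_id]

lemma pv_ids_nodup (t : List Int) : (PySem.List.pyRange 0 (t.length : Int) 1).Nodup := by
  rw [PySem.List.pyRange_zero_natCast]
  exact List.Nodup.map (fun a b h => by exact_mod_cast h) (List.nodup_range)

lemma pv_val (t : List Int) :
    ∀ kv ∈ (rankDict t).items, ∀ x ∈ kv.2, PySem.List.pyGetD t x 0 = kv.1 := by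
  intro kv hkv x hx
  rw [pv_items t] at hkv
  obtain ⟨c, _, rfl⟩ := List.mem_map.mp hkv
  show PySem.List.pyGetD t x 0 = c
  have hx' : x ∈ (rankDict t).getD c [] := hx
  rw [pv_getD t c] at hx'
  obtain ⟨p, hp, rfl⟩ := List.mem_map.mp hx'
  have hpm := List.mem_of_mem_filter hp
  have hpc : (p.1 == c) = true := (List.mem_filter.mp hp).2
  rw [pvPairs] at hpm
  obtain ⟨r, _, rfl⟩ := List.mem_map.mp hpm
  simpa using hpc

lemma pv_perm (t : List Int) :
    (pvGroups t).flatten.Perm (PySem.List.pyRange 0 t.length 1) := by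
  have hodperm : (pvOd t).Perm (rankDict t).items := PySem.List.sorted_perm _ _ _
  have h1 : (pvGroups t).flatten.Perm (((pvOd t).map (fun kv => kv.2)).flatten) := by
    rw [pvGroups]
    exact pv_flatten_map_perm (pvOd t) _ _ (fun kv _ => PySem.List.sorted_perm _ _ _)
  have h2 : (((pvOd t).map (fun kv => kv.2)).flatten).Perm
      (((rankDict t).items.map (fun kv => kv.2)).flatten) :=
    List.Perm.flatten (hodperm.map _)
  have h3 : (rankDict t).items.map (fun kv => kv.2)
      = (PySem.Set.ofList ((pvPairs t).map (fun p => p.1))).map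
          (fun c => ((pvPairs t).filter (fun p => p.1 == c)).map (fun p => p.2)) := by
    rw [pv_items, pv_keys, List.map_map]
    exact List.map_congr_left (fun c _ => by simp [Function.comp, pv_getD])
  have h4 := pv_partition_perm (PySem.Set.ofList ((pvPairs t).map (fun p => p.1))) (pvPairs t)
    (PySem.Set.nodup_ofList _) (fun p hp => by
      have hm : p.1 ∈ (pvPairs t).map (fun q => q.1) := List.mem_map.mpr ⟨p, hp, rfl⟩
      simpa [PySem.Set.mem_ofList] using hm)
  have h5 := pv_map_snd t
  exact (h1.trans h2).trans (by rw [h3]; exact h5 ▸ h4)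

lemma pv_pairwise (t : List Int) :
    (pvGroups t).flatten.Pairwise
      (fun a b => toLex (PySem.List.pyGetD t b 0, b) < toLex (PySem.List.pyGetD t a 0, a)) := by
  rw [List.pairwise_flatten]
  have hodperm : (pvOd t).Perm (rankDict t).items := PySem.List.sorted_perm _ _ _
  constructor
  · intro g hg
    rw [pvGroups] at hg
    obtain ⟨kv, hkv, rfl⟩ := List.mem_map.mp hg
    have hkv' : kv ∈ (rankDict t).items := hodperm.subset hkv
    have hle : (PySem.List.sorted kv.2 (fun x => x) true).Pairwise (fun a b => b ≤ a) :=
      PySem.List.sorted_pairwise_rev _ _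
    have hsub : kv.2.Nodup := by
      rw [pv_items t] at hkv'
      obtain ⟨c, _, rfl⟩ := List.mem_map.mp hkv'
      show ((rankDict t).getD c []).Nodup
      rw [pv_getD]
      have hsl : (((pvPairs t).filter (fun p => p.1 == c)).map (fun p => p.2)).Sublist
          ((pvPairs t).map (fun p => p.2)) :=
        List.Sublist.map _ List.filter_sublist
      exact hsl.nodup (by rw [pv_map_snd]; exact pv_ids_nodup t)
    have hnd : (PySem.List.sorted kv.2 (fun x => x) true).Nodup :=
      ((PySem.List.sorted_perm _ _ _).nodup_iff).mpr hsub
    have hstrict : (PySem.List.sorted kv.2 (fun x => x) true).Pairwise (fun a b => b < a) :=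
      (hle.and hnd).imp (fun h => lt_of_le_of_ne h.1 (Ne.symm h.2))
    refine hstrict.imp_of_mem ?_
    intro a b ha hb hba
    have hva := pv_val t kv hkv' a (by rwa [PySem.List.mem_sorted] at ha)
    have hvb := pv_val t kv hkv' b (by rwa [PySem.List.mem_sorted] at hb)
    rw [Prod.Lex.lt_iff]
    simp [hva, hvb, hba]
  · rw [pvGroups, List.pairwise_map]
    have hle : (pvOd t).Pairwise (fun a b => b.1 ≤ a.1) := PySem.List.sorted_pairwise_rev _ _
    have hne : (pvOd t).Pairwise (fun a b => a.1 ≠ b.1) := by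
      have h1 : ((rankDict t).items.map (fun p => p.1)).Nodup := by
        have hk : (rankDict t).items.map (fun p => p.1) = (rankDict t).keys := by
          simp [PySem.Dict.keys]
        rw [hk]; exact pv_nodup_keys t
      have h2 : ((pvOd t).map (fun p => p.1)).Nodup := ((hodperm.map _).nodup_iff).mpr h1
      exact List.pairwise_map.mp h2
    refine (hle.and hne).imp_of_mem ?_
    intro kv kv' hkv hkv' h x hx y hy
    have hvx1 := pv_val t kv (hodperm.subset hkv) x (by rwa [PySem.List.mem_sorted] at hx)
    have hvy1 := pv_val t kv' (hodperm.subset hkv') y (by rwa [PySem.List.mem_sorted] at hy)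
    have hlt : kv'.1 < kv.1 := lt_of_le_of_ne h.1 (Ne.symm h.2)
    rw [Prod.Lex.lt_iff]
    simp [hvx1, hvy1]
    exact Or.inl hlt

lemma pv_A_eq_flatten (t : List Int) (hlen : (pvGroups t).flatten.length = t.length) :
    rankRowTargets t = (pvGroups t).flatten := by
  have h6 := pv_fill_groups (pvGroups t) [] (List.replicate t.length (0 : Int)) (by simp [hlen])
  have h7 : (pvGroups t).foldl
      (fun st g => g.foldl (fun st num => (PySem.List.pySetD st.1 st.2 num, st.2 + 1)) st)
      (([] : List Int) ++ List.replicate t.length (0 : Int), ((([] : List Int).length : Int)))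
      = (pvOd t).foldl rankFill (List.replicate t.length (0 : Int), (0 : Int)) := by
    rw [pvGroups, List.foldl_map]
    rfl
  simp only [rankRowTargets]
  rw [show PySem.List.sorted (rankDict t).items (fun p => p.1) true = pvOd t from rfl]
  rw [← h7, h6]
  simp [hlen]

lemma pv_rank_eq (t : List Int) : rankRowTargets t = rankRowTargets_alt t := by
  have hperm := pv_perm t
  have hlen : (pvGroups t).flatten.length = t.length := by
    have hl := hperm.length_eq
    rw [hl, PySem.List.pyRange_zero_natCast]
    simp
  have hA := pv_A_eq_flatten t hlen
  have hB : rankRowTargets_alt t = (pvGroups t).flatten := by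
    rw [rankRowTargets_alt]
    exact PySem.List.sorted_rev_eq_of_perm_of_pairwise_gt _ _ _ hperm (pv_pairwise t)
  rw [hA, hB]

-- ===== VERDICT (by name: the statement is the Claim_ definition above) =====
theorem rankRowTargets_spec : Claim_equal_rankRowTargets := by
  intro t _
  unfold Spec_rankRowTargets
  exact pv_rank_eq t
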